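-- pv_equiv track=rewrite | github.com/lync-cyber/CataForge | src/cataforge/platform/helpers.py | _replace_toml_mcp_section
-- ===== SOURCE A (Python) =====
-- def _replace_toml_mcp_section(existing: str, server_id: str, section: str) -> str:
--     lines = existing.splitlines()
--     headers: list[tuple[int, str]] = []
--     for idx, line in enumerate(lines):
--         stripped = line.strip()
--         if stripped.startswith("[") and stripped.endswith("]"):
--             headers.append((idx, stripped[1:-1].strip()))
--
--     prefix = f"mcp_servers.{server_id}"
--     start: int | None = None
--     end: int | None = None
--     for pos, (idx, header) in enumerate(headers):
--         if header == prefix or header.startswith(prefix + "."):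
--             if start is None:
--                 start = idx
--             next_idx = headers[pos + 1][0] if pos + 1 < len(headers) else len(lines)
--             end = next_idx
--         elif start is not None:
--             break
--
--     if start is not None:
--         assert end is not None
--         new_lines = lines[:start] + lines[end:]
--         existing = "\n".join(new_lines).strip()
--
--     if existing:
--         return existing + "\n\n" + section
--     return section
-- ===== SOURCE B (Python) =====
-- def _replace_toml_mcp_section(existing: str, server_id: str, section: str) -> str:
--     prefix = f"mcp_servers.{server_id}"
--     output: list[str] = []
--     removing = False
--     done = False
--     found = False
--     for line in existing.splitlines():
--         stripped = line.strip()
--         if stripped.startswith("[") and stripped.endswith("]"):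
--             header = stripped[1:-1].strip()
--             matches = header == prefix or header.startswith(prefix + ".")
--             if removing and not matches:
--                 removing = False
--                 done = True
--             elif not removing and matches and not done:
--                 removing = True
--                 found = True
--         if not removing:
--             output.append(line)
--     if found:
--         existing = "\n".join(output).strip()
--     if existing:
--         return existing + "\n\n" + section
--     return section
-- ===== Notes on version B (the rewrite author's own statement) =====
-- stated objective: simpler
-- what changed: Replaced A's two-pass scheme (build an indexed list of all bracket headers, scan that index for the removal range, then splice the line list with slices) by a single pass over the lines with a removing/done/found state machine that copies kept lines directly.
import Mathlib
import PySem

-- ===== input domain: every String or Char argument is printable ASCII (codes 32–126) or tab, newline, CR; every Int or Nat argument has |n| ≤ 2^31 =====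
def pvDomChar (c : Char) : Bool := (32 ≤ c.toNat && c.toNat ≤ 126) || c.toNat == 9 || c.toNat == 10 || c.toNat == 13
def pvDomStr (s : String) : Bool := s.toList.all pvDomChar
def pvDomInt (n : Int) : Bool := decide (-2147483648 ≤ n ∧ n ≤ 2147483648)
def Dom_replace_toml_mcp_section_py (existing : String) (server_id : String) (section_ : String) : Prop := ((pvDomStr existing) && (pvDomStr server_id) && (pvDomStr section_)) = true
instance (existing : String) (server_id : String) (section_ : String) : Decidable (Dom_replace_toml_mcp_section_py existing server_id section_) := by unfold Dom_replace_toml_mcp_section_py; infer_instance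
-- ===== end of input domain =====

-- B replaces A's two-pass "index all headers, then scan the index for the removal range and slice"
-- with a single pass over the lines driven by a removing/done/found state machine (objective: simpler, same O(n) cost).

-- ===== PORT A =====
-- shared transliterations of the Python expressions both sources contain:
--   line.strip() is a '[...]' header; its text 'stripped[1:-1].strip()'; 'header == prefix or header.startswith(prefix + ".")'
def pvIsHdr (line : String) : Bool :=
  let stripped := PySem.Str.strip line
  PySem.Str.startswith stripped "[" && PySem.Str.endswith stripped "]"
def pvHdrTxt (line : String) : String :=
  PySem.Str.strip (PySem.Str.slice (PySem.Str.strip line) (some 1) (some (-1)))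
def pvMatch (pre header : String) : Bool :=
  header == pre || PySem.Str.startswith header (pre ++ ".")
def pvALoop (pre : String) (total : Int) :
    List (Int × String) → Option Int → Option Int → Option Int × Option Int
  | [], start?, end? => (start?, end?)
  | (idx, header) :: rest, start?, end? =>
    if pvMatch pre header then
      let start' := match start? with | none => some idx | some _ => start?
      let next_idx := match rest with | [] => total | (j, _) :: _ => j
      pvALoop pre total rest start' (some next_idx)
    else
      match start? with
      | some _ => (start?, end?)
      | none => pvALoop pre total rest none end?

def replace_toml_mcp_section_py (existing : String) (server_id : String) (section_ : String) : String :=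
  let lines := PySem.Str.splitlines existing
  let headers := (PySem.List.enumerate lines 0).foldl
    (fun acc p => if pvIsHdr p.2 then acc ++ [(p.1, pvHdrTxt p.2)] else acc) []
  let pre := "mcp_servers." ++ server_id
  let existing' :=
    match pvALoop pre (lines.length : Int) headers none none with
    | (some s, some e) =>
        PySem.Str.strip (PySem.Str.join "\n"
          (PySem.List.slice lines none (some s) ++ PySem.List.slice lines (some e) none))
    | _ => existing   -- start is None: existing untouched (Python's assert makes (some _, none) unreachable)
  if existing' ≠ "" then existing' ++ "\n\n" ++ section_ else section_

-- ===== PORT B =====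
-- one step of B's state machine; state = (output, removing, done, found)
def pvBStep (pre : String) (st : List String × Bool × Bool × Bool) (line : String) :
    List String × Bool × Bool × Bool :=
  match st with
  | (out, removing, done, found) =>
    let (removing', done', found') :=
      if pvIsHdr line then
        let m := pvMatch pre (pvHdrTxt line)
        if removing && !m then (false, true, found)
        else if !removing && m && !done then (true, done, true)
        else (removing, done, found)
      else (removing, done, found)
    (if removing' then out else out ++ [line], removing', done', found')
def replace_toml_mcp_section_py_alt (existing : String) (server_id : String) (section_ : String) : String :=
  let pre := "mcp_servers." ++ server_id
  match (PySem.Str.splitlines existing).foldl (pvBStep pre) ([], false, false, false) with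
  | (out, _, _, found) =>
    let existing' := if found then PySem.Str.strip (PySem.Str.join "\n" out) else existing
    if existing' ≠ "" then existing' ++ "\n\n" ++ section_ else section_

-- ===== PRECONDITION & SPEC =====
def Spec_replace_toml_mcp_section_py (existing : String) (server_id : String) (section_ : String) (out : String) : Prop := out = replace_toml_mcp_section_py_alt existing server_id section_
instance (existing : String) (server_id : String) (section_ : String) (out : String) : Decidable (Spec_replace_toml_mcp_section_py existing server_id section_ out) := by unfold Spec_replace_toml_mcp_section_py; infer_instance

-- ===== CLAIM (what is proved, stated in full; the proofs are below) =====
def Claim_equal_replace_toml_mcp_section_py : Prop := ∀ (existing : String) (server_id : String) (section_ : String), Dom_replace_toml_mcp_section_py existing server_id section_ → Spec_replace_toml_mcp_section_py existing server_id section_ (replace_toml_mcp_section_py existing server_id section_)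

-- ===== LEMMAS AND PROOFS =====

-- a line that is a header whose text matches the prefix / a header whose text does not (stops a removal run)
def pvM (pre : String) (l : String) : Bool := pvIsHdr l && pvMatch pre (pvHdrTxt l)
def pvStop (pre : String) (l : String) : Bool := pvIsHdr l && !pvMatch pre (pvHdrTxt l)


-- A's header-collecting loop, as structural recursion over the lines with their start offset
def pvHdrsFrom : List String → Int → List (Int × String)
  | [], _ => []
  | l :: ls, k =>
    if pvIsHdr l then (k, pvHdrTxt l) :: pvHdrsFrom ls (k + 1) else pvHdrsFrom ls (k + 1)

lemma pvHdrs_eq (ls : List String) (k : Int) (acc : List (Int × String)) :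
    (PySem.List.enumerate ls k).foldl
      (fun acc p => if pvIsHdr p.2 then acc ++ [(p.1, pvHdrTxt p.2)] else acc) acc
      = acc ++ pvHdrsFrom ls k := by
  induction ls generalizing k acc with
  | nil => simp [pvHdrsFrom, PySem.List.enumerate]
  | cons l ls ih =>
    rw [PySem.List.enumerate_cons]
    by_cases h : pvIsHdr l <;> simp [h, pvHdrsFrom, List.foldl_cons, ih]


-- index of the first header in the list, or total (= 'headers[pos + 1][0] if pos + 1 < len(headers) else len(lines)')
def pvFirstIdx (total : Int) : List (Int × String) → Int
  | [] => total
  | (i, _) :: _ => i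


lemma pvALoop_cons_match_some (pre : String) (total idx : Int) (header : String)
    (rest : List (Int × String)) (s : Int) (e? : Option Int) (h : pvMatch pre header = true) :
    pvALoop pre total ((idx, header) :: rest) (some s) e?
      = pvALoop pre total rest (some s) (some (pvFirstIdx total rest)) := by
  cases rest with
  | nil => simp [pvALoop, h, pvFirstIdx]
  | cons p t => cases p; simp [pvALoop, h, pvFirstIdx]

lemma pvALoop_cons_match_none (pre : String) (total idx : Int) (header : String)
    (rest : List (Int × String)) (e? : Option Int) (h : pvMatch pre header = true) :
    pvALoop pre total ((idx, header) :: rest) none e?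
      = pvALoop pre total rest (some idx) (some (pvFirstIdx total rest)) := by
  cases rest with
  | nil => simp [pvALoop, h, pvFirstIdx]
  | cons p t => cases p; simp [pvALoop, h, pvFirstIdx]

lemma pvALoop_cons_nomatch_none (pre : String) (total idx : Int) (header : String)
    (rest : List (Int × String)) (e? : Option Int) (h : pvMatch pre header = false) :
    pvALoop pre total ((idx, header) :: rest) none e? = pvALoop pre total rest none e? := by
  simp [pvALoop, h]

lemma pvALoop_cons_nomatch_some (pre : String) (total idx : Int) (header : String)
    (rest : List (Int × String)) (s : Int) (e? : Option Int) (h : pvMatch pre header = false) :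
    pvALoop pre total ((idx, header) :: rest) (some s) e? = (some s, e?) := by
  simp [pvALoop, h]

lemma pvALoop_run (pre : String) (ls : List String) (k s0 total : Int)
    (htot : total = k + ls.length) :
    pvALoop pre total (pvHdrsFrom ls k) (some s0) (some (pvFirstIdx total (pvHdrsFrom ls k)))
      = (some s0, some (k + (ls.takeWhile (fun l => !pvStop pre l)).length)) := by
  induction ls generalizing k with
  | nil => simp [pvHdrsFrom, pvFirstIdx, pvALoop, htot]
  | cons l ls ih =>
    have htot' : total = (k + 1) + (ls.length : Int) := by
      rw [htot]; push_cast [List.length_cons]; ring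
    by_cases hh : pvIsHdr l
    · rw [show pvHdrsFrom (l :: ls) k = (k, pvHdrTxt l) :: pvHdrsFrom ls (k + 1) from by
        simp [pvHdrsFrom, hh]]
      by_cases hmt : pvMatch pre (pvHdrTxt l)
      · have hns : (!pvStop pre l) = true := by simp [pvStop, hh, hmt]
        rw [pvALoop_cons_match_some _ _ _ _ _ _ _ hmt, ih (k + 1) htot']
        simp [List.takeWhile_cons, hns, Prod.mk.injEq, Option.some.injEq]
        omega
      · have hs : (!pvStop pre l) = false := by simp [pvStop, hh, hmt]
        rw [pvALoop_cons_nomatch_some _ _ _ _ _ _ _ (Bool.eq_false_iff.mpr hmt)]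
        simp [pvFirstIdx, List.takeWhile_cons, hs]
    · have hns : (!pvStop pre l) = true := by simp [pvStop, hh]
      rw [show pvHdrsFrom (l :: ls) k = pvHdrsFrom ls (k + 1) from by simp [pvHdrsFrom, hh]]
      rw [ih (k + 1) htot']
      simp [List.takeWhile_cons, hns, Prod.mk.injEq, Option.some.injEq]
      omega

lemma pvALoop_main (pre : String) (ls : List String) (k total : Int)
    (htot : total = k + ls.length) :
    pvALoop pre total (pvHdrsFrom ls k) none none
      = match ls.dropWhile (fun l => !pvM pre l) with
        | [] => (none, none)
        | _ :: rest =>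
          (some (k + (ls.takeWhile (fun l => !pvM pre l)).length),
           some (k + (ls.takeWhile (fun l => !pvM pre l)).length + 1
                 + (rest.takeWhile (fun l => !pvStop pre l)).length)) := by
  induction ls generalizing k with
  | nil => simp [pvHdrsFrom, pvALoop]
  | cons l ls ih =>
    have htot' : total = (k + 1) + (ls.length : Int) := by
      rw [htot]; push_cast [List.length_cons]; ring
    by_cases hm : pvM pre l
    · have hh : pvIsHdr l := (Bool.and_eq_true_iff.mp hm).1
      have hmt : pvMatch pre (pvHdrTxt l) = true := (Bool.and_eq_true_iff.mp hm).2
      have h1 : (!pvM pre l) = false := by simp [hm]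
      rw [show pvHdrsFrom (l :: ls) k = (k, pvHdrTxt l) :: pvHdrsFrom ls (k + 1) from by
        simp [pvHdrsFrom, hh]]
      rw [pvALoop_cons_match_none _ _ _ _ _ _ hmt]
      rw [pvALoop_run pre ls (k + 1) k total htot']
      simp only [List.dropWhile_cons, List.takeWhile_cons, h1, Bool.false_eq_true, if_false,
        List.length_nil]
      simp only [Prod.mk.injEq, Option.some.injEq]
      omega
    · have h0 : pvM pre l = false := Bool.eq_false_iff.mpr hm
      have h1 : (!pvM pre l) = true := by simp [h0]
      have hstep : pvALoop pre total (pvHdrsFrom (l :: ls) k) none none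
          = pvALoop pre total (pvHdrsFrom ls (k + 1)) none none := by
        by_cases hh : pvIsHdr l
        · have hmt : pvMatch pre (pvHdrTxt l) = false := by
            have : pvMatch pre (pvHdrTxt l) ≠ true := fun h' => hm (by simp [pvM, hh, h'])
            simpa using this
          rw [show pvHdrsFrom (l :: ls) k = (k, pvHdrTxt l) :: pvHdrsFrom ls (k + 1) from by
            simp [pvHdrsFrom, hh]]
          exact pvALoop_cons_nomatch_none _ _ _ _ _ _ hmt
        · rw [show pvHdrsFrom (l :: ls) k = pvHdrsFrom ls (k + 1) from by simp [pvHdrsFrom, hh]]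
      rw [hstep, ih (k + 1) htot']
      simp only [List.dropWhile_cons, List.takeWhile_cons, h1, if_true]
      cases hdw : ls.dropWhile (fun x => !pvM pre x) with
      | nil => simp [hdw]
      | cons a rest =>
        simp only [hdw, List.length_cons]
        simp only [Prod.mk.injEq, Option.some.injEq]
        omega
lemma pvB_done (pre : String) (ls : List String) (out : List String) (f : Bool) :
    ls.foldl (pvBStep pre) (out, false, true, f) = (out ++ ls, false, true, f) := by
  induction ls generalizing out with
  | nil => simp
  | cons l ls ih =>
    have : pvBStep pre (out, false, true, f) l = (out ++ [l], false, true, f) := by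
      by_cases h : pvIsHdr l <;> simp [pvBStep, h]
    rw [List.foldl_cons, this, ih]; simp

lemma pvB_removing (pre : String) (ls : List String) (out : List String) (f : Bool) :
    ls.foldl (pvBStep pre) (out, true, false, f)
      = match ls.dropWhile (fun l => !pvStop pre l) with
        | [] => (out, true, false, f)
        | s :: rest => (out ++ s :: rest, false, true, f) := by
  induction ls generalizing out with
  | nil => simp
  | cons l ls ih =>
    by_cases hs : pvStop pre l
    · have hh : pvIsHdr l := (Bool.and_eq_true_iff.mp hs).1
      have hm : pvMatch pre (pvHdrTxt l) = false := by
        have := (Bool.and_eq_true_iff.mp hs).2; simpa using this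
      have : pvBStep pre (out, true, false, f) l = (out ++ [l], false, true, f) := by
        simp [pvBStep, hh, hm]
      rw [List.foldl_cons, this, pvB_done]
      simp [List.dropWhile_cons, hs]
    · have hstep : pvBStep pre (out, true, false, f) l = (out, true, false, f) := by
        by_cases hh : pvIsHdr l
        · have hm : pvMatch pre (pvHdrTxt l) = true := by
            by_contra hm'
            exact hs (by simp [pvStop, hh, Bool.eq_false_iff.mpr hm'] )
          simp [pvBStep, hh, hm]
        · simp [pvBStep, hh]
      rw [List.foldl_cons, hstep, ih]
      simp [List.dropWhile_cons, hs]

lemma pvB_main (pre : String) (ls : List String) (out : List String) :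
    ls.foldl (pvBStep pre) (out, false, false, false)
      = match ls.dropWhile (fun l => !pvM pre l) with
        | [] => (out ++ ls, false, false, false)
        | _ :: rest =>
          match rest.dropWhile (fun l => !pvStop pre l) with
          | [] => (out ++ ls.takeWhile (fun l => !pvM pre l), true, false, true)
          | s :: r2 => (out ++ ls.takeWhile (fun l => !pvM pre l) ++ s :: r2, false, true, true) := by
  induction ls generalizing out with
  | nil => simp
  | cons l ls ih =>
    by_cases hm : pvM pre l
    · have hh : pvIsHdr l := (Bool.and_eq_true_iff.mp hm).1
      have hmt : pvMatch pre (pvHdrTxt l) = true := (Bool.and_eq_true_iff.mp hm).2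
      have hstep : pvBStep pre (out, false, false, false) l = (out, true, false, true) := by
        simp [pvBStep, hh, hmt]
      have h1 : (!pvM pre l) = false := by simp [hm]
      rw [List.foldl_cons, hstep, pvB_removing]
      simp only [List.dropWhile_cons, List.takeWhile_cons, h1, Bool.false_eq_true, if_false]
      cases hdw : ls.dropWhile (fun x => !pvStop pre x) <;> simp [hdw]
    · have h0 : pvM pre l = false := Bool.eq_false_iff.mpr hm
      have hstep : pvBStep pre (out, false, false, false) l = (out ++ [l], false, false, false) := by
        by_cases hh : pvIsHdr l
        · have hmt : pvMatch pre (pvHdrTxt l) = false := by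
            have : pvMatch pre (pvHdrTxt l) ≠ true := fun h' => hm (by simp [pvM, hh, h'])
            simpa using this
          simp [pvBStep, hh, hmt]
        · simp [pvBStep, hh]
      rw [List.foldl_cons, hstep, ih]
      simp only [List.dropWhile_cons, List.takeWhile_cons, h0, Bool.not_false, if_true]
      cases hdw : ls.dropWhile (fun x => !pvM pre x) with
      | nil => simp [hdw]
      | cons a rest =>
        simp only [hdw]
        cases rest.dropWhile (fun x => !pvStop pre x) <;> simp
lemma pvDropParts (P tw dws : List String) (m : String) :
    (P ++ m :: (tw ++ dws)).drop (P.length + 1 + tw.length) = dws := by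
  have h : P ++ m :: (tw ++ dws) = (P ++ m :: tw) ++ dws := by simp
  have hl : P.length + 1 + tw.length = (P ++ m :: tw).length := by simp; omega
  rw [h, hl, List.drop_left]

lemma pv_main_eq (existing server_id section_ : String) :
    replace_toml_mcp_section_py existing server_id section_
      = replace_toml_mcp_section_py_alt existing server_id section_ := by
  unfold replace_toml_mcp_section_py replace_toml_mcp_section_py_alt
  dsimp only
  set pre := "mcp_servers." ++ server_id with hpre
  set ls := PySem.Str.splitlines existing with hls
  rw [pvHdrs_eq ls 0 [], List.nil_append]
  rw [pvALoop_main pre ls 0 (ls.length : Int) (by omega)]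
  rw [pvB_main pre ls []]
  cases hdw : ls.dropWhile (fun l => !pvM pre l) with
  | nil => simp
  | cons m rest =>
    set P := ls.takeWhile (fun l => !pvM pre l) with hP
    set tw := rest.takeWhile (fun l => !pvStop pre l) with htw
    have hsplit : ls = P ++ m :: rest := by
      conv_lhs => rw [← List.takeWhile_append_dropWhile (p := fun l => !pvM pre l) (l := ls)]
      rw [hdw]
    have hrest : rest = tw ++ rest.dropWhile (fun l => !pvStop pre l) :=
      (List.takeWhile_append_dropWhile).symm
    have htake : ls.take P.length = P := by
      rw [hsplit]; exact List.take_left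
    have hdrop : ls.drop (P.length + 1 + tw.length)
        = rest.dropWhile (fun l => !pvStop pre l) := by
      conv_lhs => rw [hsplit, hrest]
      exact pvDropParts P tw _ m
    have e1 : ((0 : Int) + (P.length : Int)) = ((P.length : Nat) : Int) := by push_cast; ring
    have e2 : ((P.length : Int) + 1 + (tw.length : Int))
        = (((P.length + 1 + tw.length : Nat)) : Int) := by push_cast; ring
    simp only
    rw [← htw, e1, e2, PySem.List.slice_to_natCast, PySem.List.slice_from_natCast, htake, hdrop]
    cases hdws : rest.dropWhile (fun l => !pvStop pre l) with
    | nil => simp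
    | cons s r2 => simp

-- ===== VERDICT (by name: the statement is the Claim_ definition above) =====
theorem replace_toml_mcp_section_py_spec : Claim_equal_replace_toml_mcp_section_py := by
  intro existing server_id section_ _
  exact pv_main_eq existing server_id section_
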